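-- pv_equiv track=rewrite | github.com/OTKRyu/algorithm_problem_solving | notation/programmers_70129.py | solution
-- ===== SOURCE A (Python) =====
-- def trans(num):
--     trans_num=""
--     while num:
--         trans_num += str(num%2)
--         num //= 2
--     trans_num = trans_num[::-1]
--     return trans_num
--
-- def solution(s):
--     zeros=0
--     count=0
--     while 1:
--         count += 1
--         local_zeros = 0
--         for i in range(len(s)):
--             if s[i] == "0":
--                 local_zeros += 1
--         zeros += local_zeros
--         s = trans(len(s) - local_zeros)
--         if s == "1":
--             break
--
--     answer = [count, zeros]
--     return answer
-- ===== SOURCE B (Python) =====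
-- def bits_ones(n):
--     """(bit_length, popcount) of n >= 0 by recursion on n // 2."""
--     if n == 0:
--         return (0, 0)
--     b, o = bits_ones(n // 2)
--     return (b + 1, o + n % 2)
--
-- def chain(n):
--     """the sequence of ones-counts visited: n, popcount(n), ..., 1."""
--     if n == 1:
--         return [n]
--     return [n] + chain(bits_ones(n)[1])
--
-- def solution(s):
--     z0 = s.count('0')
--     c = chain(len(s) - z0)
--     total_bits = sum(bits_ones(n)[0] for n in c[:-1])
--     return [len(c), z0 + total_bits - sum(c[1:])]
-- ===== Notes on version B (the rewrite author's own statement) =====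
-- stated objective: alternative
-- what changed: B first builds the whole chain of ones-counts recursively (with an arithmetic (bit_length,popcount) helper instead of binary strings), then derives the answer algebraically: count = len(chain), zeros = s.count('0') + sum of bit lengths of the chain minus sum of its successors; A instead simulates step by step, rebuilding and rescanning a binary string each iteration.
-- outside the precondition, e.g. on solution('0'): A does not finish within the time limit, B raises RecursionError; on solution(''): A does not finish within the time limit, B raises RecursionError
import Mathlib
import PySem

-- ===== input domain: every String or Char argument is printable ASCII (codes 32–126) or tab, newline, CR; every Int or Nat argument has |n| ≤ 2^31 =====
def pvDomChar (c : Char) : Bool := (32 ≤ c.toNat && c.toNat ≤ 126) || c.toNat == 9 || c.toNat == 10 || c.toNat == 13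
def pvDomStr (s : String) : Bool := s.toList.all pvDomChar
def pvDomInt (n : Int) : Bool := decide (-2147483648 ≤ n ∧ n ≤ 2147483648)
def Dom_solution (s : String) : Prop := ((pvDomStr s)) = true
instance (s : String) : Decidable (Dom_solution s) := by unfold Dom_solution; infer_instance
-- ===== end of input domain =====

-- B builds the whole chain of ones-counts first (arithmetic bit helper, no binary
-- strings), then gets the answer algebraically from the chain (objective: alternative).

-- ===== PORT A =====

-- trans(num): builds the binary string LSB-first by appending, then reverses.
def transLoop (n : Nat) (acc : List Char) : List Char :=
  if h : n = 0 then acc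
  else transLoop (n / 2) (acc ++ [if n % 2 = 1 then '1' else '0'])
termination_by n
decreasing_by exact Nat.div_lt_self (Nat.pos_of_ne_zero h) (by norm_num)

def pyTrans (n : Nat) : List Char := (transLoop n []).reverse

-- the inner 'for i in range(len(s)): if s[i] == "0": local_zeros += 1'
def localZeros (s : List Char) : Int :=
  (PySem.List.pyRange 0 (s.length : Int) 1).foldl
    (fun lz i => if PySem.List.pyGetD s i ' ' = '0' then lz + 1 else lz) 0

-- the 'while 1' loop; fuel is a totality device only (under Pre_ the Python loop
-- terminates within s.length + 2 iterations, proved below; fuel never runs out there).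
-- local_zeros ≤ len(s), so '(↑len - lz).toNat' is exactly Python's 'len(s) - local_zeros'.
def solutionLoop : Nat → List Char → Int → Int → List Int
  | 0, _, _, _ => []
  | fuel + 1, s, count, zeros =>
    let count := count + 1
    let lz := localZeros s
    let zeros := zeros + lz
    let s' := pyTrans ((s.length : Int) - lz).toNat
    if s' = ['1'] then [count, zeros] else solutionLoop fuel s' count zeros

def solution (s : String) : List Int := solutionLoop (s.toList.length + 2) s.toList 0 0

-- ===== PORT B =====

-- bits_ones(n): (bit_length, popcount) by recursion on n // 2 (n ≥ 0 here).
def bitsOnes (n : Nat) : Nat × Nat :=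
  if h : n = 0 then (0, 0)
  else
    let p := bitsOnes (n / 2)
    (p.1 + 1, p.2 + n % 2)
termination_by n
decreasing_by exact Nat.div_lt_self (Nat.pos_of_ne_zero h) (by norm_num)

-- chain(n): the recursion of Source B; fuel is a totality device only (the recursion
-- strictly decreases for n ≥ 2, so fuel len(s)+1 never runs out under Pre_).
def chainF : Nat → Nat → List Nat
  | 0, _ => []
  | fuel + 1, n => if n = 1 then [n] else n :: chainF fuel (bitsOnes n).2

def solution_alt (s : String) : List Int :=
  let z0 : Nat := s.toList.count '0'
  let c := chainF (s.toList.length + 1) (s.toList.length - z0)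
  let totalBits : Nat := (c.dropLast.map (fun n => (bitsOnes n).1)).sum
  [(c.length : Int), (z0 : Int) + (totalBits : Int) - ((c.drop 1).sum : Int)]

-- ===== PRECONDITION & SPEC =====
-- Pre_ excludes exactly the strings whose characters are all '0' (including the empty
-- string): there the ones-count is 0, so A loops forever (trans(0) = "") and B's
-- recursion never reaches 1 either.
def Pre_solution (s : String) : Prop := (s.toList.any (fun c => c != '0')) = true
instance (s : String) : Decidable (Pre_solution s) := by unfold Pre_solution; infer_instance
def pvWitness_solution : String := "10"

def Spec_solution (s : String) (out : List Int) : Prop := out = solution_alt s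
instance (s : String) (out : List Int) : Decidable (Spec_solution s out) := by unfold Spec_solution; infer_instance

-- ===== CLAIM (what is proved, stated in full; the proofs are below) =====
def Claim_equal_solution : Prop := ∀ (s : String), Dom_solution s → Pre_solution s → Spec_solution s (solution s)

-- ===== LEMMAS AND PROOFS =====

lemma bitsOnes_step (m : Nat) (h : m ≠ 0) :
    bitsOnes m = ((bitsOnes (m / 2)).1 + 1, (bitsOnes (m / 2)).2 + m % 2) := by
  rw [bitsOnes]; simp [h]

lemma transLoop_acc (m : Nat) : ∀ acc, transLoop m acc = acc ++ transLoop m [] := by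
  induction m using Nat.strong_induction_on with
  | _ m ih =>
    intro acc
    by_cases h : m = 0
    · simp [h, transLoop]
    · have hd := Nat.div_lt_self (Nat.pos_of_ne_zero h) (by norm_num : 1 < 2)
      conv_lhs => rw [transLoop]
      conv_rhs => rw [transLoop]
      rw [dif_neg h, dif_neg h, ih (m / 2) hd, ih (m / 2) hd ([] ++ _)]
      simp

lemma bits_step (m : Nat) (h : m ≠ 0) :
    transLoop m [] = (if m % 2 = 1 then '1' else '0') :: transLoop (m / 2) [] := by
  rw [transLoop]
  simp only [h, dif_neg, not_false_iff]
  rw [transLoop_acc]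
  simp

-- trans's output has bit_length characters, of which popcount are '1'.
lemma bits_len_count (m : Nat) :
    (transLoop m []).length = (bitsOnes m).1 ∧
    (transLoop m []).count '0' + (bitsOnes m).2 = (bitsOnes m).1 := by
  induction m using Nat.strong_induction_on with
  | _ m ih =>
    by_cases h : m = 0
    · subst h
      rw [transLoop, bitsOnes]
      constructor <;> simp
    · have hm : 0 < m := Nat.pos_of_ne_zero h
      obtain ⟨ihl, ihc⟩ := ih (m / 2) (Nat.div_lt_self hm (by norm_num))
      rw [bits_step m h, bitsOnes_step m h]
      by_cases hp : m % 2 = 1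
      · rw [if_pos hp,
          show List.count '0' ('1' :: transLoop (m / 2) []) = List.count '0' (transLoop (m / 2) [])
            from by simp]
        simp only [List.length_cons]
        omega
      · rw [if_neg hp,
          show List.count '0' ('0' :: transLoop (m / 2) []) = List.count '0' (transLoop (m / 2) []) + 1
            from by simp]
        simp only [List.length_cons]
        omega

lemma pyTrans_len_count (m : Nat) :
    (pyTrans m).length = (bitsOnes m).1 ∧
    (pyTrans m).count '0' + (bitsOnes m).2 = (bitsOnes m).1 := by
  have := bits_len_count m
  simpa [pyTrans] using this

lemma bitLen_pos (m : Nat) (h : 1 ≤ m) : 1 ≤ (bitsOnes m).1 := by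
  rw [bitsOnes_step m (by omega)]; omega

lemma bitLen_two (m : Nat) (h : 2 ≤ m) : 2 ≤ (bitsOnes m).1 := by
  rw [bitsOnes_step m (by omega)]
  have := bitLen_pos (m / 2) (by omega)
  omega

lemma ones_pos (m : Nat) (h : 1 ≤ m) : 1 ≤ (bitsOnes m).2 := by
  induction m using Nat.strong_induction_on with
  | _ m ih =>
    rw [bitsOnes_step m (by omega)]
    by_cases hp : m % 2 = 1
    · omega
    · have h2 : 1 ≤ m / 2 := by omega
      have := ih (m / 2) (by omega) h2
      omega

lemma ones_lt (m : Nat) (h : 2 ≤ m) : (bitsOnes m).2 < m := by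
  induction m using Nat.strong_induction_on with
  | _ m ih =>
    rw [bitsOnes_step m (by omega)]
    by_cases h2 : 2 ≤ m / 2
    · have := ih (m / 2) (by omega) h2
      omega
    · have h1 : m / 2 = 1 := by omega
      have : (bitsOnes (m / 2)).2 = 1 := by
        rw [h1, bitsOnes_step 1 (by omega), show (1 : Nat) / 2 = 0 from rfl, bitsOnes]
        simp
      omega

lemma pyTrans_ne_one (m : Nat) (h : 2 ≤ m) : pyTrans m ≠ ['1'] := by
  intro he
  have h1 := (pyTrans_len_count m).1
  rw [he] at h1
  simp at h1
  have := bitLen_two m h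
  omega

lemma localZeros_eq (s : List Char) : localZeros s = (s.count '0' : Int) := by
  unfold localZeros
  rw [PySem.List.foldl_pyRange_zero_pyGetD' s ' '
    (fun (lz : Int) c => if c = '0' then lz + 1 else lz) 0]
  rw [PySem.List.foldl_ite_add_one (fun c => c = '0') s 0]
  have : List.countP (fun x => decide (x = '0')) s = s.count '0' := by
    apply List.countP_congr; intro x _; simp
  simp [this]

lemma chainF_head (f n : Nat) (hf : 1 ≤ f) :
    ∃ t, chainF f n = n :: t := by
  obtain ⟨f', rfl⟩ : ∃ f', f = f' + 1 := ⟨f - 1, by omega⟩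
  by_cases h : n = 1
  · exact ⟨[], by simp [chainF, h]⟩
  · exact ⟨chainF f' (bitsOnes n).2, by simp [chainF, h]⟩

-- A's step loop equals the chain-and-aggregate computation of B.
lemma loops_agree (m : Nat) : ∀ (s : List Char) (c z : Int) (fa fb : Nat),
    s.length - s.count '0' = m → 1 ≤ m → m + 1 ≤ fa → m ≤ fb →
    solutionLoop fa s c z =
      [c + ((chainF fb m).length : Int),
       z + (s.count '0' : Int)
         + (((chainF fb m).dropLast.map (fun n => (bitsOnes n).1)).sum : Int)
         - (((chainF fb m).drop 1).sum : Int)] := by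
  induction m using Nat.strong_induction_on with
  | _ m ih =>
    intro s c z fa fb hm h1 hfa hfb
    obtain ⟨fa', rfl⟩ : ∃ fa', fa = fa' + 1 := ⟨fa - 1, by omega⟩
    obtain ⟨fb', rfl⟩ : ∃ fb', fb = fb' + 1 := ⟨fb - 1, by omega⟩
    have hcle : s.count '0' ≤ s.length := List.count_le_length
    have htn : (((s.length : Int)) - (s.count '0' : Int)).toNat = m := by omega
    rw [solutionLoop]
    simp only [localZeros_eq, htn]
    by_cases hone : m = 1
    · subst hone
      have ht1 : pyTrans 1 = ['1'] := by
        rw [pyTrans, bits_step 1 (by norm_num), transLoop]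
        simp
      rw [if_pos ht1]
      simp [chainF]
    · have h2 : 2 ≤ m := by omega
      rw [if_neg (pyTrans_ne_one m h2)]
      set m' := (bitsOnes m).2 with hm'
      have hm'1 : 1 ≤ m' := ones_pos m (by omega)
      have hm'lt : m' < m := ones_lt m h2
      obtain ⟨hl, hc⟩ := pyTrans_len_count m
      have hrec := ih m' hm'lt (pyTrans m) (c + 1) (z + (s.count '0' : Int)) fa' fb'
        (by omega) hm'1 (by omega) (by omega)
      rw [hrec]
      obtain ⟨t, hch⟩ := chainF_head fb' m' (by omega)
      have hchain : chainF (fb' + 1) m = m :: chainF fb' m' := by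
        simp only [chainF, if_neg hone, ← hm']
      rw [hchain, hch]
      have hbl1 : 1 ≤ (bitsOnes m).1 := bitLen_pos m (by omega)
      simp only [List.dropLast_cons_of_ne_nil (by simp : (m' :: t) ≠ []),
        List.map_cons, List.sum_cons, List.drop_one, List.tail_cons, List.length_cons,
        List.cons.injEq, and_true]
      constructor
      · push_cast; ring
      · have hpc : (pyTrans m).count '0' = (bitsOnes m).1 - m' := by omega
        rw [hpc]
        rcases t with _ | ⟨a, t'⟩
        · simp; omega
        · simp only [List.dropLast_cons_of_ne_nil (by simp : (a :: t') ≠ []),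
            List.map_cons, List.sum_cons, List.sum_cons]
          push_cast
          omega

-- ===== VERDICT (by name: the statement is the Claim_ definition above) =====
theorem solution_spec : Claim_equal_solution := by
  intro s _ hpre
  unfold Spec_solution solution solution_alt
  set l := s.toList with hl
  have hcle : l.count '0' ≤ l.length := List.count_le_length
  have hlt : l.count '0' < l.length := by
    obtain ⟨c, hc, hne⟩ := List.any_eq_true.mp hpre
    rw [bne_iff_ne] at hne
    by_contra hge
    have heq : l.count '0' = l.length := by omega
    exact hne ((List.count_eq_length.mp heq c hc).symm)
  have h1 : 1 ≤ l.length - l.count '0' := by omega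
  have := loops_agree (l.length - l.count '0') l 0 0 (l.length + 2) (l.length + 1)
    rfl h1 (by omega) (by omega)
  rw [this]
  simp
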